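-- pv_equiv track=rewrite | github.com/justpers/Algorithm | 자물쇠와 열쇠.py | solution
-- ===== SOURCE A (Python) =====
-- def rotation(key):
--     m = len(key[0])
--     rot_arr = [[0] * m for _ in range(m)]
--     for i in range(m):
--         for j in range(m):
--             rot_arr[i][j] = key[m-j-1][i]
--     return rot_arr
--
-- def check(new_lock, n):
--     for i in range(n, 2 * n):
--         for j in range(n, 2 * n):
--             if new_lock[i][j] != 1:
--                 return False
--     return True
--
-- def solution(key, lock):
--
--     m = len(key[0])
--     n = len(lock[0])
--
--     # 수월하게 탐색하기 위해 lock 크기 3배로 늘리고 0으로 채우기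
--     new_lock = [[0] * (n * 3) for _ in range(n*3)]
--     for i in range(n, 2*n):
--         for j in range(n, 2*n):
--             new_lock[i][j] = lock[i-n][j-n]
--
--     for _ in range(4):
--         key = rotation(key) # 오른쪽으로 90도
--         for row in range(n*3 - n +1):
--             for col in range(n*3-n+1):
--                 for i in range(m):
--                     for j in range(m):
--                         new_lock[row + i][col + j] += key[i][j]
--
--                 if check(new_lock, n):
--                     return True
--
--                 for i in range(m):
--                     for j in range(m):
--                         new_lock[row + i][col + j] -= key[i][j]
--
--     return False
-- ===== SOURCE B (Python) =====
-- def solution(key, lock):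
--     m = len(key[0])
--     n = len(lock[0])
--     key = [row[:m] for row in key[:m]]
--     lock = [row[:n] for row in lock[:n]]
--     bad = [(i, j) for i in range(n) for j in range(n) if lock[i][j] != 1]
--     if not bad:
--         return True
--     lo_i = min(i for i, j in bad); hi_i = max(i for i, j in bad)
--     lo_j = min(j for i, j in bad); hi_j = max(j for i, j in bad)
--     for _ in range(4):
--         key = [[row[i] for row in reversed(key)] for i in range(m)]
--         for dr in range(hi_i - m + 1, lo_i + 1):
--             for dc in range(hi_j - m + 1, lo_j + 1):
--                 if all(lock[dr + i][dc + j] + key[i][j] == 1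
--                        for i in range(m) for j in range(m)
--                        if 0 <= dr + i < n and 0 <= dc + j < n):
--                     return True
--     return False
-- ===== Notes on version B (the rewrite author's own statement) =====
-- stated objective: faster
-- what changed: Instead of tripling the lock board and physically adding/checking/removing the key for every offset with a full-board rescan, B collects the lock's non-1 cells once, uses their bounding box to enumerate only the offsets whose key window can cover all of them, and tests each such placement directly against the lock with an m*m window scan (no board mutation, no n*n rescan).
-- outside the precondition, e.g. on solution([[1, 1], [1, 1]], [[0]]): A returns True, B returns True
import Mathlib
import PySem

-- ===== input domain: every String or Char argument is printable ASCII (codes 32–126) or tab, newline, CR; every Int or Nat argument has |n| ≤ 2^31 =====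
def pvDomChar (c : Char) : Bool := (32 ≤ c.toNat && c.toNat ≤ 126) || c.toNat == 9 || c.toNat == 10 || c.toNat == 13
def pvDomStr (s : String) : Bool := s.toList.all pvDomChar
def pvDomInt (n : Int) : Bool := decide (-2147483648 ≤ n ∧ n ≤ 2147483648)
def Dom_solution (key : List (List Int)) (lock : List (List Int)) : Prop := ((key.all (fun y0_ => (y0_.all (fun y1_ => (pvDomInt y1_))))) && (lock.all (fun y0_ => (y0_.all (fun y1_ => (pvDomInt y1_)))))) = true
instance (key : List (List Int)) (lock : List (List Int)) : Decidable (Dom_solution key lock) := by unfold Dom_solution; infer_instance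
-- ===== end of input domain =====

-- B replaces A's tripled mutable board (add key / rescan whole board / remove key at every
-- offset) by a one-pass list of the lock's non-1 cells whose bounding box prunes the offsets,
-- each candidate checked directly against the lock; return value only, no argument is mutated.

-- ===== PORT A =====
-- board cell read b[i][j] / write b[i][j] := f b[i][j]; indices are in range under Pre_ ,
-- so the getD/modify defaults are never consulted there.
def pvGet2 (b : List (List Int)) (i j : Nat) : Int := (b.getD i []).getD j 0
def pvSet2 (b : List (List Int)) (i j : Nat) (f : Int → Int) : List (List Int) :=
  b.modify i (fun r => r.modify j f)

-- def rotation(key): rot_arr[i][j] = key[m-j-1][i]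
def pvRotation (key : List (List Int)) : List (List Int) :=
  let m := (key.headD []).length
  (List.range m).map (fun i => (List.range m).map (fun j => pvGet2 key (m - j - 1) i))

-- def check(new_lock, n): all center cells == 1 (early False return = all)
def check (newLock : List (List Int)) (n : Nat) : Bool :=
  (List.range' n n).all (fun i => (List.range' n n).all (fun j => pvGet2 newLock i j == 1))

-- new_lock = 3n×3n zeros; new_lock[i][j] = lock[i-n][j-n] for i,j in range(n,2n)
def pvBuild (lock : List (List Int)) (n : Nat) : List (List Int) :=
  (List.range' n n).foldl (fun b i => (List.range' n n).foldl
      (fun b j => pvSet2 b i j (fun _ => pvGet2 lock (i - n) (j - n))) b)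
    (List.replicate (3 * n) (List.replicate (3 * n) 0))

-- the += loop
def pvAdd (b key : List (List Int)) (row col m : Nat) : List (List Int) :=
  (List.range m).foldl (fun b i => (List.range m).foldl
      (fun b j => pvSet2 b (row + i) (col + j) (fun x => x + pvGet2 key i j)) b) b

-- the -= loop
def pvSub (b key : List (List Int)) (row col m : Nat) : List (List Int) :=
  (List.range m).foldl (fun b i => (List.range m).foldl
      (fun b j => pvSet2 b (row + i) (col + j) (fun x => x - pvGet2 key i j)) b) b

-- the col loop: add, test, early return True, else remove and continue
def pvCols (b key : List (List Int)) (n m row : Nat) : List Nat → Bool × List (List Int)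
  | [] => (false, b)
  | col :: cs =>
      let b1 := pvAdd b key row col m
      if check b1 n then (true, b1)
      else pvCols (pvSub b1 key row col m) key n m row cs

-- the row loop
def pvRows (b key : List (List Int)) (n m : Nat) : List Nat → Bool × List (List Int)
  | [] => (false, b)
  | row :: rs =>
      match pvCols b key n m row (List.range (3 * n - n + 1)) with
      | (true, b') => (true, b')
      | (false, b') => pvRows b' key n m rs

-- for _ in range(4): key = pvRotation(key); scan all placements
def pvRots (b key : List (List Int)) (n m : Nat) : Nat → Bool
  | 0 => false
  | t + 1 =>
      let key' := pvRotation key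
      match pvRows b key' n m (List.range (3 * n - n + 1)) with
      | (true, _) => true
      | (false, b') => pvRots b' key' n m t

def solution (key : List (List Int)) (lock : List (List Int)) : Bool :=
  let m := (key.headD []).length
  let n := (lock.headD []).length
  pvRots (pvBuild lock n) key n m 4

-- ===== PORT B =====
-- key = [[row[i] for row in reversed(key)] for i in range(m)]
def rotB (key : List (List Int)) (m : Nat) : List (List Int) :=
  (List.range m).map (fun i => key.reverse.map (fun row => row.getD i 0))

-- all(lock[dr+i][dc+j] + key[i][j] == 1 for i for j if 0 <= dr+i < n and 0 <= dc+j < n)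
def fitsB (lockT keyT : List (List Int)) (n m : Nat) (dr dc : Int) : Bool :=
  (List.range m).all (fun i => (List.range m).all (fun j =>
    if 0 ≤ dr + (i : Int) ∧ dr + (i : Int) < (n : Int) ∧ 0 ≤ dc + (j : Int) ∧ dc + (j : Int) < (n : Int) then
      ((lockT.getD (dr + (i : Int)).toNat []).getD (dc + (j : Int)).toNat 0
        + (keyT.getD i []).getD j 0) == 1
    else true))

-- for _ in range(4): rotate; for dr in range(hi_i-m+1, lo_i+1): for dc in …: early return True
def loopRotsB (lockT keyT : List (List Int)) (n m loI hiI loJ hiJ : Nat) : Nat → Bool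
  | 0 => false
  | t + 1 =>
      let k := rotB keyT m
      if (PySem.List.pyRange ((hiI : Int) - (m : Int) + 1) ((loI : Int) + 1)).any (fun dr =>
           (PySem.List.pyRange ((hiJ : Int) - (m : Int) + 1) ((loJ : Int) + 1)).any (fun dc =>
             fitsB lockT k n m dr dc))
      then true
      else loopRotsB lockT k n m loI hiI loJ hiJ t

-- key[:m] / lock[:n] row-trimmed to square
def trimSq (x : List (List Int)) (s : Nat) : List (List Int) := (x.take s).map (fun r => r.take s)

-- bad = [(i, j) for i in range(n) for j in range(n) if lock[i][j] != 1]
def badL (lockT : List (List Int)) (n : Nat) : List (Nat × Nat) :=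
  (List.range n).flatMap (fun i => (List.range n).filterMap (fun j =>
      if ((lockT.getD i []).getD j 0 : Int) ≠ 1 then some (i, j) else none))

def solution_alt (key : List (List Int)) (lock : List (List Int)) : Bool :=
  let m := (key.headD []).length
  let n := (lock.headD []).length
  let keyT := trimSq key m
  let lockT := trimSq lock n
  let bad := badL lockT n
  if bad.isEmpty then true
  else
    -- min/max of a nonempty list; the .getD default is never consulted (bad ≠ [])
    let loI := ((bad.map Prod.fst).min?).getD 0
    let hiI := ((bad.map Prod.fst).max?).getD 0
    let loJ := ((bad.map Prod.snd).min?).getD 0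
    let hiJ := ((bad.map Prod.snd).max?).getD 0
    loopRotsB lockT keyT n m loI hiI loJ hiJ 4

-- ===== PRECONDITION & SPEC =====
-- Pre_ = the natural domain of the puzzle: a nonempty m×m key fitting an n×n lock (m ≤ n),
-- both supplied with at least that many rows/columns (A reads exactly these index ranges and
-- raises IndexError on shorter input; extra rows/columns beyond m resp. n are ignored by A).
-- Pre_ also excludes oversized keys (m > n), on which A's tripled board is too small: there A
-- raises IndexError on the later offsets unless an accidental early placement returns True first.
def Pre_solution (key : List (List Int)) (lock : List (List Int)) : Prop :=
  1 ≤ (key.headD []).length ∧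
  (key.headD []).length ≤ (lock.headD []).length ∧
  (key.headD []).length ≤ key.length ∧
  (∀ r ∈ key.take (key.headD []).length, (key.headD []).length ≤ r.length) ∧
  (lock.headD []).length ≤ lock.length ∧
  (∀ r ∈ lock.take (lock.headD []).length, (lock.headD []).length ≤ r.length)
instance (key : List (List Int)) (lock : List (List Int)) : Decidable (Pre_solution key lock) := by
  unfold Pre_solution; infer_instance

def pvWitness_solution : List (List Int) × List (List Int) := ([[0]], [[0]])

def Spec_solution (key : List (List Int)) (lock : List (List Int)) (out : Bool) : Prop := out = solution_alt key lock
instance (key : List (List Int)) (lock : List (List Int)) (out : Bool) : Decidable (Spec_solution key lock out) := by unfold Spec_solution; infer_instance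

-- ===== CLAIM (what is proved, stated in full; the proofs are below) =====
def Claim_equal_solution : Prop := ∀ (key : List (List Int)) (lock : List (List Int)), Dom_solution key lock → Pre_solution key lock → Spec_solution key lock (solution key lock)

-- ===== LEMMAS AND PROOFS =====

def rotIter (key : List (List Int)) : Nat → List (List Int)
  | 0 => key
  | s + 1 => pvRotation (rotIter key s)

lemma length_pvSet2 (b : List (List Int)) (i j : Nat) (f : Int → Int) :
    (pvSet2 b i j f).length = b.length := List.length_modify _ b i

lemma getD_pvSet2 (b : List (List Int)) (i j k : Nat) (f : Int → Int) :
    (pvSet2 b i j f).getD k [] = if i = k then (b.getD k []).modify j f else b.getD k [] := by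
  simp only [pvSet2, List.getD_eq_getElem?_getD, List.getElem?_modify]
  cases h : b[k]? <;> split <;> simp

lemma rowlen_pvSet2 (b : List (List Int)) (i j k : Nat) (f : Int → Int) :
    ((pvSet2 b i j f).getD k []).length = (b.getD k []).length := by
  rw [getD_pvSet2]; split <;> simp

lemma pvGet2_pvSet2_same (b : List (List Int)) (i j : Nat) (f : Int → Int)
    (hj : j < (b.getD i []).length) :
    pvGet2 (pvSet2 b i j f) i j = f (pvGet2 b i j) := by
  simp only [pvGet2, getD_pvSet2, if_true]
  rw [List.getD_eq_getElem _ _ (by simpa using hj),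
    List.getElem_modify_eq f j _ (by simpa using hj), List.getD_eq_getElem _ _ hj]

lemma pvGet2_pvSet2_ne (b : List (List Int)) (i j i' j' : Nat) (f : Int → Int)
    (h : i ≠ i' ∨ j ≠ j') :
    pvGet2 (pvSet2 b i j f) i' j' = pvGet2 b i' j' := by
  simp only [pvGet2, getD_pvSet2]
  rcases h with h | h
  · rw [if_neg h]
  · split
    · simp only [List.getD_eq_getElem?_getD, List.getElem?_modify_ne f _ h]
    · rfl

lemma pvGet2_foldl_set2 (g : Nat × Nat → Int → Int) :
    ∀ (ps : List (Nat × Nat)) (b : List (List Int)), ps.Nodup →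
    (∀ p ∈ ps, p.2 < (b.getD p.1 []).length) →
    ∀ r c : Nat,
      pvGet2 (ps.foldl (fun b p => pvSet2 b p.1 p.2 (g p)) b) r c
        = if (r, c) ∈ ps then g (r, c) (pvGet2 b r c) else pvGet2 b r c := by
  intro ps
  induction ps with
  | nil => simp
  | cons p ps ih =>
    intro b hnd hin r c
    simp only [List.foldl_cons]
    rw [ih _ (hnd.of_cons) (fun q hq => by rw [rowlen_pvSet2]; exact hin q (List.mem_cons_of_mem _ hq))]
    by_cases hmem : (r, c) ∈ ps
    · have hne : ¬(p.1 = r ∧ p.2 = c) := by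
        rintro ⟨h1, h2⟩
        exact (List.nodup_cons.mp hnd).1 (by rwa [show p = (r, c) from Prod.ext h1 h2] at *)
      rw [if_pos hmem, if_pos (List.mem_cons_of_mem _ hmem),
        pvGet2_pvSet2_ne _ _ _ _ _ _ (not_and_or.mp hne)]
    · by_cases hp : p = (r, c)
      · subst hp
        rw [if_neg hmem, if_pos (List.mem_cons_self ..),
          pvGet2_pvSet2_same _ _ _ _ (hin _ (List.mem_cons_self ..))]
      · have hne : ¬(p.1 = r ∧ p.2 = c) := by
          rintro ⟨h1, h2⟩; exact hp (Prod.ext h1 h2)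
        rw [if_neg hmem, if_neg (by
            intro hc
            rcases List.mem_cons.mp hc with hc | hc
            · exact hp hc.symm
            · exact hmem hc),
          pvGet2_pvSet2_ne _ _ _ _ _ _ (not_and_or.mp hne)]

lemma length_foldl_set2 (g : Nat × Nat → Int → Int) (ps : List (Nat × Nat)) :
    ∀ b : List (List Int), (ps.foldl (fun b p => pvSet2 b p.1 p.2 (g p)) b).length = b.length := by
  induction ps with
  | nil => simp
  | cons p ps ih => intro b; simp only [List.foldl_cons]; rw [ih, length_pvSet2]

lemma rowlen_foldl_set2 (g : Nat × Nat → Int → Int) (ps : List (Nat × Nat)) (k : Nat) :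
    ∀ b : List (List Int), ((ps.foldl (fun b p => pvSet2 b p.1 p.2 (g p)) b).getD k []).length = (b.getD k []).length := by
  induction ps with
  | nil => simp
  | cons p ps ih => intro b; simp only [List.foldl_cons]; rw [ih, rowlen_pvSet2]

lemma nested_eq_product (f : List (List Int) → Nat × Nat → List (List Int))
    (is js : List Nat) :
    ∀ b : List (List Int), is.foldl (fun b i => js.foldl (fun b j => f b (i, j)) b) b
      = (is.flatMap (fun i => js.map (fun j => (i, j)))).foldl f b := by
  induction is with
  | nil => simp
  | cons i is ih =>
    intro b
    simp only [List.foldl_cons, List.flatMap_cons, List.foldl_append, List.foldl_map]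
    rw [ih]

lemma board_ext (b1 b2 : List (List Int)) (hl : b1.length = b2.length)
    (hr : ∀ k, (b1.getD k []).length = (b2.getD k []).length)
    (hg : ∀ r c, pvGet2 b1 r c = pvGet2 b2 r c) : b1 = b2 := by
  apply List.ext_getElem hl
  intro k h1 h2
  apply List.ext_getElem
  · rw [← List.getD_eq_getElem b1 [] h1, ← List.getD_eq_getElem b2 [] h2]; exact hr k
  intro c hc1 hc2
  have := hg k c
  rwa [pvGet2, pvGet2, List.getD_eq_getElem b1 [] h1, List.getD_eq_getElem b2 [] h2,
    List.getD_eq_getElem _ 0 hc1, List.getD_eq_getElem _ 0 hc2] at this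

def Sq (b : List (List Int)) (N : Nat) : Prop := b.length = N ∧ ∀ r ∈ b, r.length = N

lemma Sq.rowlen {b : List (List Int)} {N : Nat} (h : Sq b N) {k : Nat} (hk : k < N) :
    (b.getD k []).length = N := by
  rw [List.getD_eq_getElem b [] (h.1 ▸ hk)]
  exact h.2 _ (List.getElem_mem _)

def wContrib (key : List (List Int)) (row col m r c : Nat) : Int :=
  if row ≤ r ∧ r < row + m ∧ col ≤ c ∧ c < col + m then pvGet2 key (r - row) (c - col) else 0


-- the shifted position list of the add/sub loops
def posL (row col m : Nat) : List (Nat × Nat) :=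
  ((List.range m).flatMap (fun i => (List.range m).map (fun j => (i, j)))).map
    (fun p => (row + p.1, col + p.2))

lemma nodup_posL (row col m : Nat) : (posL row col m).Nodup := by
  apply List.Nodup.map
  · intro p q h
    simp only [Prod.mk.injEq] at h
    exact Prod.ext (by omega) (by omega)
  · have : (List.range m).flatMap (fun i => (List.range m).map (fun j => (i, j)))
        = (List.range m).product (List.range m) := rfl
    rw [this]
    exact List.Nodup.product (List.nodup_range) (List.nodup_range)

lemma mem_posL (row col m : Nat) (r c : Nat) :
    ((r, c) ∈ posL row col m) ↔ (row ≤ r ∧ r < row + m ∧ col ≤ c ∧ c < col + m) := by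
  simp only [posL, List.mem_map, List.mem_flatMap, List.mem_range, Prod.mk.injEq]
  constructor
  · rintro ⟨p, ⟨i, hi, j, hj, rfl⟩, h1, h2⟩; omega
  · rintro ⟨h1, h2, h3, h4⟩
    exact ⟨(r - row, c - col), ⟨r - row, by omega, c - col, by omega, rfl⟩, by omega, by omega⟩

lemma pvAdd_eq_fold (b key : List (List Int)) (row col m : Nat) :
    pvAdd b key row col m
      = (posL row col m).foldl
          (fun b p => pvSet2 b p.1 p.2 (fun x => x + pvGet2 key (p.1 - row) (p.2 - col))) b := by
  rw [pvAdd, posL, List.foldl_map,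
    nested_eq_product (fun b p => pvSet2 b (row + p.1) (col + p.2) (fun x => x + pvGet2 key p.1 p.2))]
  simp only [Nat.add_sub_cancel_left]

lemma pvGet2_pvAdd (b key : List (List Int)) (row col m : Nat) (N : Nat)
    (hb : Sq b N) (hrow : row + m ≤ N) (hcol : col + m ≤ N) (r c : Nat) :
    pvGet2 (pvAdd b key row col m) r c = pvGet2 b r c + wContrib key row col m r c := by
  rw [pvAdd_eq_fold,
    pvGet2_foldl_set2 _ _ _ (nodup_posL row col m) (by
      rintro ⟨x, y⟩ hp
      rcases (mem_posL row col m x y).mp hp with ⟨h1, h2, h3, h4⟩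
      rw [hb.rowlen (by omega)]; omega)]
  rw [wContrib]
  by_cases hmem : (r, c) ∈ posL row col m
  · rw [if_pos hmem, if_pos (by rcases (mem_posL row col m r c).mp hmem with h; omega)]
  · rw [if_neg hmem, if_neg (fun h => hmem ((mem_posL row col m r c).mpr h)), add_zero]


lemma pvSub_eq_fold (b key : List (List Int)) (row col m : Nat) :
    pvSub b key row col m
      = (posL row col m).foldl
          (fun b p => pvSet2 b p.1 p.2 (fun x => x - pvGet2 key (p.1 - row) (p.2 - col))) b := by
  rw [pvSub, posL, List.foldl_map,
    nested_eq_product (fun b p => pvSet2 b (row + p.1) (col + p.2) (fun x => x - pvGet2 key p.1 p.2))]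
  simp only [Nat.add_sub_cancel_left]

lemma pvGet2_pvSub (b key : List (List Int)) (row col m : Nat) (N : Nat)
    (hb : Sq b N) (hrow : row + m ≤ N) (hcol : col + m ≤ N) (r c : Nat) :
    pvGet2 (pvSub b key row col m) r c = pvGet2 b r c - wContrib key row col m r c := by
  rw [pvSub_eq_fold,
    pvGet2_foldl_set2 _ _ _ (nodup_posL row col m) (by
      rintro ⟨x, y⟩ hp
      rcases (mem_posL row col m x y).mp hp with ⟨h1, h2, h3, h4⟩
      rw [hb.rowlen (by omega)]; omega)]
  rw [wContrib]
  by_cases hmem : (r, c) ∈ posL row col m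
  · rw [if_pos hmem, if_pos (by rcases (mem_posL row col m r c).mp hmem with h; omega)]
  · rw [if_neg hmem, if_neg (fun h => hmem ((mem_posL row col m r c).mpr h)), sub_zero]

lemma length_getD_shape (b : List (List Int)) (N : Nat)
    (hl : b.length = N) (hr : ∀ k, k < N → (b.getD k []).length = N) : Sq b N := by
  refine ⟨hl, fun r hr' => ?_⟩
  rcases List.mem_iff_getElem.mp hr' with ⟨k, hk, rfl⟩
  rw [← List.getD_eq_getElem b [] hk]
  exact hr k (hl ▸ hk)

lemma Sq_pvAdd (b key : List (List Int)) (row col m N : Nat) (hb : Sq b N) :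
    Sq (pvAdd b key row col m) N := by
  apply length_getD_shape
  · rw [pvAdd_eq_fold, length_foldl_set2]; exact hb.1
  · intro k hk
    rw [pvAdd_eq_fold, rowlen_foldl_set2]; exact hb.rowlen hk

lemma pvSub_pvAdd (b key : List (List Int)) (row col m N : Nat)
    (hb : Sq b N) (hrow : row + m ≤ N) (hcol : col + m ≤ N) :
    pvSub (pvAdd b key row col m) key row col m = b := by
  apply board_ext
  · rw [pvSub_eq_fold, length_foldl_set2, pvAdd_eq_fold, length_foldl_set2]
  · intro k
    rw [pvSub_eq_fold, rowlen_foldl_set2, pvAdd_eq_fold, rowlen_foldl_set2]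
  · intro r c
    rw [pvGet2_pvSub _ _ _ _ _ _ (Sq_pvAdd b key row col m N hb) hrow hcol,
      pvGet2_pvAdd _ _ _ _ _ _ hb hrow hcol]
    ring


def ctrL (n : Nat) : List (Nat × Nat) :=
  (List.range' n n).flatMap (fun i => (List.range' n n).map (fun j => (i, j)))

lemma mem_ctrL (n r c : Nat) :
    ((r, c) ∈ ctrL n) ↔ (n ≤ r ∧ r < 2 * n ∧ n ≤ c ∧ c < 2 * n) := by
  simp only [ctrL, List.mem_flatMap, List.mem_map, List.mem_range'_1, Prod.mk.injEq]
  constructor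
  · rintro ⟨i, hi, j, hj, rfl, rfl⟩; omega
  · rintro ⟨h1, h2, h3, h4⟩; exact ⟨r, by omega, c, ⟨by omega, rfl, rfl⟩⟩

lemma nodup_ctrL (n : Nat) : (ctrL n).Nodup := by
  have : ctrL n = (List.range' n n).product (List.range' n n) := rfl
  rw [this]
  exact List.Nodup.product (List.nodup_range' ..) (List.nodup_range' ..)

lemma pvBuild_eq_fold (lock : List (List Int)) (n : Nat) :
    pvBuild lock n
      = (ctrL n).foldl (fun b p => pvSet2 b p.1 p.2 (fun _ => pvGet2 lock (p.1 - n) (p.2 - n)))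
          (List.replicate (3 * n) (List.replicate (3 * n) 0)) := by
  rw [pvBuild, ctrL,
    nested_eq_product (fun b p => pvSet2 b p.1 p.2 (fun _ => pvGet2 lock (p.1 - n) (p.2 - n)))]

lemma Sq_replicate (n : Nat) : Sq (List.replicate (3 * n) (List.replicate (3 * n) (0 : Int))) (3 * n) := by
  refine ⟨List.length_replicate, fun r hr => ?_⟩
  rw [List.eq_of_mem_replicate hr]; exact List.length_replicate

lemma Sq_pvBuild (lock : List (List Int)) (n : Nat) : Sq (pvBuild lock n) (3 * n) := by
  apply length_getD_shape
  · rw [pvBuild_eq_fold, length_foldl_set2]; exact (Sq_replicate n).1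
  · intro k hk
    rw [pvBuild_eq_fold, rowlen_foldl_set2]; exact (Sq_replicate n).rowlen hk

lemma pvGet2_replicate (n r c : Nat) :
    pvGet2 (List.replicate (3 * n) (List.replicate (3 * n) (0 : Int))) r c = 0 := by
  rw [pvGet2]
  by_cases hr : r < 3 * n
  · rw [List.getD_eq_getElem _ [] (by simpa using hr), List.getElem_replicate]
    by_cases hc : c < 3 * n
    · rw [List.getD_eq_getElem _ 0 (by simpa using hc), List.getElem_replicate]
    · rw [List.getD_eq_default _ 0 (by simpa using hc)]
  · rw [List.getD_eq_default _ [] (by simpa using hr)]; simp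

lemma pvGet2_pvBuild (lock : List (List Int)) (n r c : Nat) :
    pvGet2 (pvBuild lock n) r c
      = if n ≤ r ∧ r < 2 * n ∧ n ≤ c ∧ c < 2 * n then pvGet2 lock (r - n) (c - n) else 0 := by
  rw [pvBuild_eq_fold,
    pvGet2_foldl_set2 _ _ _ (nodup_ctrL n) (by
      rintro ⟨x, y⟩ hp
      rcases (mem_ctrL n x y).mp hp with ⟨h1, h2, h3, h4⟩
      rw [(Sq_replicate n).rowlen (by omega)]; omega)]
  rw [pvGet2_replicate]
  by_cases hmem : (r, c) ∈ ctrL n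
  · rw [if_pos hmem, if_pos ((mem_ctrL n r c).mp hmem)]
  · rw [if_neg hmem, if_neg (fun h => hmem ((mem_ctrL n r c).mpr h))]


lemma check_iff (b : List (List Int)) (n : Nat) :
    check b n = true ↔ ∀ i j : Nat, n ≤ i → i < 2 * n → n ≤ j → j < 2 * n → pvGet2 b i j = 1 := by
  simp only [check, List.all_eq_true, List.mem_range'_1, beq_iff_eq]
  constructor
  · intro h i j h1 h2 h3 h4; exact h i ⟨h1, by omega⟩ j ⟨h3, by omega⟩
  · intro h i hi j hj; exact h i j hi.1 (by omega) hj.1 (by omega)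


def FitsM (lock k : List (List Int)) (n m : Nat) (dr dc : Int) : Prop :=
  ∀ i j : Nat, i < n → j < n →
    pvGet2 lock i j +
      (if dr ≤ (i : Int) ∧ (i : Int) < dr + (m : Int) ∧ dc ≤ (j : Int) ∧ (j : Int) < dc + (m : Int)
       then pvGet2 k ((i : Int) - dr).toNat ((j : Int) - dc).toNat else 0) = 1

lemma wContrib_cast (k : List (List Int)) (row col m n i j : Nat) :
    wContrib k row col m (i + n) (j + n)
      = (if ((row : Int) - n) ≤ (i : Int) ∧ (i : Int) < ((row : Int) - n) + (m : Int)
            ∧ ((col : Int) - n) ≤ (j : Int) ∧ (j : Int) < ((col : Int) - n) + (m : Int)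
         then pvGet2 k ((i : Int) - ((row : Int) - n)).toNat ((j : Int) - ((col : Int) - n)).toNat
         else 0) := by
  rw [wContrib]
  by_cases h : row ≤ i + n ∧ i + n < row + m ∧ col ≤ j + n ∧ j + n < col + m
  · rw [if_pos h, if_pos (by omega)]
    congr 1 <;> omega
  · rw [if_neg h, if_neg (by intro hc; apply h; omega)]

lemma check_pvAdd_iff (lock k : List (List Int)) (n m row col : Nat)
    (hm : m ≤ n) (hrow : row ≤ 2 * n) (hcol : col ≤ 2 * n) :
    check (pvAdd (pvBuild lock n) k row col m) n = true
      ↔ FitsM lock k n m ((row : Int) - n) ((col : Int) - n) := by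
  rw [check_iff, FitsM]
  constructor
  · intro h i j hi hj
    have := h (i + n) (j + n) (by omega) (by omega) (by omega) (by omega)
    rw [pvGet2_pvAdd _ _ _ _ _ (3 * n) (Sq_pvBuild lock n) (by omega) (by omega),
      pvGet2_pvBuild, if_pos (by omega), wContrib_cast] at this
    simpa [Nat.add_sub_cancel] using this
  · intro h i' j' h1 h2 h3 h4
    have := h (i' - n) (j' - n) (by omega) (by omega)
    rw [pvGet2_pvAdd _ _ _ _ _ (3 * n) (Sq_pvBuild lock n) (by omega) (by omega),
      pvGet2_pvBuild, if_pos (by omega)]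
    have hrw : i' - n + n = i' := by omega
    have hrw2 : j' - n + n = j' := by omega
    rw [← hrw, ← hrw2, wContrib_cast]
    simpa [Nat.add_sub_cancel] using this

lemma pvCols_spec (key : List (List Int)) (n m row : Nat) (hm : m ≤ n) (hrow : row + m ≤ 3 * n) :
    ∀ (cols : List Nat) (b : List (List Int)), Sq b (3 * n) →
      (∀ col ∈ cols, col + m ≤ 3 * n) →
      (pvCols b key n m row cols).1 = cols.any (fun col => check (pvAdd b key row col m) n) ∧
      ((pvCols b key n m row cols).1 = false → (pvCols b key n m row cols).2 = b) := by
  intro cols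
  induction cols with
  | nil => intro b _ _; simp [pvCols]
  | cons col cs ih =>
    intro b hb hcols
    rw [pvCols]
    by_cases hchk : check (pvAdd b key row col m) n = true
    · simp [hchk]
    · rw [if_neg hchk, pvSub_pvAdd b key row col m (3 * n) hb hrow (hcols col (List.mem_cons_self ..))]
      rcases ih b hb (fun c hc => hcols c (List.mem_cons_of_mem _ hc)) with ⟨h1, h2⟩
      refine ⟨?_, h2⟩
      rw [h1, List.any_cons]
      simp [hchk]

lemma pvRows_spec (key : List (List Int)) (n m : Nat) (hm : m ≤ n) :
    ∀ (rows : List Nat) (b : List (List Int)), Sq b (3 * n) →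
      (∀ row ∈ rows, row + m ≤ 3 * n) →
      (pvRows b key n m rows).1
          = rows.any (fun row => (List.range (3 * n - n + 1)).any
              (fun col => check (pvAdd b key row col m) n)) ∧
      ((pvRows b key n m rows).1 = false → (pvRows b key n m rows).2 = b) := by
  intro rows
  induction rows with
  | nil => intro b _ _; simp [pvRows]
  | cons row rs ih =>
    intro b hb hrows
    have hcols : ∀ col ∈ List.range (3 * n - n + 1), col + m ≤ 3 * n := by
      intro col hc; rw [List.mem_range] at hc; omega
    rcases pvCols_spec key n m row hm (hrows row (List.mem_cons_self ..))
        (List.range (3 * n - n + 1)) b hb hcols with ⟨hc1, hc2⟩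
    rcases hres : pvCols b key n m row (List.range (3 * n - n + 1)) with ⟨fl, b1⟩
    rw [hres] at hc1 hc2
    rw [pvRows, hres]
    cases fl
    · have hb1 : b1 = b := hc2 rfl
      dsimp only
      rw [hb1]
      rw [hb1] at hc1
      rcases ih b hb (fun r hr => hrows r (List.mem_cons_of_mem _ hr)) with ⟨h1, h2⟩
      refine ⟨?_, h2⟩
      rw [h1, List.any_cons, ← hc1]
      simp
    · dsimp only
      refine ⟨?_, by simp⟩
      rw [List.any_cons, ← hc1]
      simp

lemma rotIter_shift (key : List (List Int)) (s : Nat) :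
    rotIter (pvRotation key) s = rotIter key (s + 1) := by
  induction s with
  | zero => rfl
  | succ s ih => show pvRotation (rotIter (pvRotation key) s) = _; rw [ih]; rfl

lemma pvRots_iff (n m : Nat) (hm : m ≤ n) :
    ∀ (t : Nat) (key b : List (List Int)), Sq b (3 * n) →
      (pvRots b key n m t = true ↔ ∃ s < t,
        (List.range (3 * n - n + 1)).any (fun row => (List.range (3 * n - n + 1)).any
          (fun col => check (pvAdd b (rotIter key (s + 1)) row col m) n)) = true) := by
  intro t
  induction t with
  | zero => intro key b hb; simp [pvRots]
  | succ t ih =>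
    intro key b hb
    rw [pvRots]
    have hrows : ∀ row ∈ List.range (3 * n - n + 1), row + m ≤ 3 * n := by
      intro r hr; rw [List.mem_range] at hr; omega
    rcases pvRows_spec (pvRotation key) n m hm (List.range (3 * n - n + 1)) b hb hrows with ⟨h1, h2⟩
    rcases hres : pvRows b (pvRotation key) n m (List.range (3 * n - n + 1)) with ⟨fl, b1⟩
    rw [hres] at h1 h2
    cases fl
    · have hb1 : b1 = b := h2 rfl
      dsimp only
      rw [hb1, ih (pvRotation key) b hb]
      constructor
      · rintro ⟨s, hs, h⟩
        refine ⟨s + 1, by omega, ?_⟩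
        rw [← rotIter_shift]
        exact h
      · rintro ⟨s, hs, h⟩
        cases s with
        | zero =>
          rw [show rotIter key 1 = pvRotation key from rfl] at h
          rw [h] at h1
          simp at h1
        | succ s =>
          refine ⟨s, by omega, ?_⟩
          rw [rotIter_shift]
          exact h
    · dsimp only
      constructor
      · intro _
        exact ⟨0, by omega, h1.symm⟩
      · intro _; rfl

lemma solution_iff (key lock : List (List Int)) (hpre : Pre_solution key lock) :
    solution key lock = true ↔ ∃ s < 4, ∃ dr dc : Int,
      -(((lock.headD []).length : Nat) : Int) ≤ dr ∧ dr ≤ ((lock.headD []).length : Int) ∧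
      -(((lock.headD []).length : Nat) : Int) ≤ dc ∧ dc ≤ ((lock.headD []).length : Int) ∧
      FitsM lock (rotIter key (s + 1)) (lock.headD []).length (key.headD []).length dr dc := by
  rcases hpre with ⟨hm1, hmn, _⟩
  show pvRots (pvBuild lock ((lock.headD []).length)) key ((lock.headD []).length)
      ((key.headD []).length) 4 = true ↔ _
  rw [pvRots_iff ((lock.headD []).length) ((key.headD []).length) hmn 4 key _
      (Sq_pvBuild lock ((lock.headD []).length))]
  set m := (key.headD []).length with hm
  set n := (lock.headD []).length with hn
  constructor
  · rintro ⟨s, hs, h⟩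
    rw [List.any_eq_true] at h
    rcases h with ⟨row, hrow, h⟩
    rw [List.any_eq_true] at h
    rcases h with ⟨col, hcol, h⟩
    rw [List.mem_range] at hrow hcol
    rw [check_pvAdd_iff lock _ n m row col hmn (by omega) (by omega)] at h
    exact ⟨s, hs, (row : Int) - n, (col : Int) - n, by omega, by omega, by omega, by omega, h⟩
  · rintro ⟨s, hs, dr, dc, h1, h2, h3, h4, h⟩
    refine ⟨s, hs, ?_⟩
    rw [List.any_eq_true]
    refine ⟨(dr + n).toNat, by rw [List.mem_range]; omega, ?_⟩
    rw [List.any_eq_true]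
    refine ⟨(dc + n).toNat, by rw [List.mem_range]; omega, ?_⟩
    rw [check_pvAdd_iff lock _ n m _ _ hmn (by omega) (by omega)]
    have e1 : (((dr + (n : Int)).toNat : Nat) : Int) - n = dr := by omega
    have e2 : (((dc + (n : Int)).toNat : Nat) : Int) - n = dc := by omega
    rw [e1, e2]
    exact h

-- ---------- B-side characterizations ----------

def rotBIter (k : List (List Int)) (m : Nat) : Nat → List (List Int)
  | 0 => k
  | s + 1 => rotB (rotBIter k m s) m

lemma rotBIter_shift (k : List (List Int)) (m s : Nat) :
    rotBIter (rotB k m) m s = rotBIter k m (s + 1) := by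
  induction s with
  | zero => rfl
  | succ s ih => show rotB (rotBIter (rotB k m) m s) m = _; rw [ih]; rfl

lemma loopRotsB_iff (lockT : List (List Int)) (n m loI hiI loJ hiJ : Nat) :
    ∀ (t : Nat) (keyT : List (List Int)),
      (loopRotsB lockT keyT n m loI hiI loJ hiJ t = true ↔ ∃ s < t,
        ((PySem.List.pyRange ((hiI : Int) - (m : Int) + 1) ((loI : Int) + 1)).any (fun dr =>
           (PySem.List.pyRange ((hiJ : Int) - (m : Int) + 1) ((loJ : Int) + 1)).any (fun dc =>
             fitsB lockT (rotBIter keyT m (s + 1)) n m dr dc))) = true) := by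
  intro t
  induction t with
  | zero => intro keyT; simp [loopRotsB]
  | succ t ih =>
    intro keyT
    rw [loopRotsB]
    by_cases hC : (PySem.List.pyRange ((hiI : Int) - (m : Int) + 1) ((loI : Int) + 1)).any (fun dr =>
        (PySem.List.pyRange ((hiJ : Int) - (m : Int) + 1) ((loJ : Int) + 1)).any (fun dc =>
          fitsB lockT (rotB keyT m) n m dr dc)) = true
    · rw [if_pos hC]
      constructor
      · intro _
        exact ⟨0, by omega, hC⟩
      · intro _; rfl
    · rw [if_neg hC, ih (rotB keyT m)]
      constructor
      · rintro ⟨s, hs, h⟩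
        refine ⟨s + 1, by omega, ?_⟩
        rw [← rotBIter_shift]
        exact h
      · rintro ⟨s, hs, h⟩
        cases s with
        | zero => exact absurd h hC
        | succ s =>
          refine ⟨s, by omega, ?_⟩
          rw [rotBIter_shift]
          exact h

lemma fitsB_iff (lockT k : List (List Int)) (n m : Nat) (dr dc : Int) :
    fitsB lockT k n m dr dc = true ↔ ∀ a b : Nat, a < m → b < m →
      (0 ≤ dr + (a : Int) ∧ dr + (a : Int) < (n : Int) ∧ 0 ≤ dc + (b : Int) ∧ dc + (b : Int) < (n : Int)) →
      pvGet2 lockT (dr + (a : Int)).toNat (dc + (b : Int)).toNat + pvGet2 k a b = 1 := by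
  simp only [fitsB, List.all_eq_true, List.mem_range]
  constructor
  · intro h a b ha hb hin
    have := h a ha b hb
    rw [if_pos hin] at this
    exact beq_iff_eq.mp this
  · intro h a ha b hb
    by_cases hin : 0 ≤ dr + (a : Int) ∧ dr + (a : Int) < (n : Int) ∧ 0 ≤ dc + (b : Int) ∧ dc + (b : Int) < (n : Int)
    · rw [if_pos hin]
      exact beq_iff_eq.mpr (h a b ha hb hin)
    · rw [if_neg hin]

lemma pvGet2_trimSq (x : List (List Int)) (s i j : Nat) (hi : i < s) (hj : j < s) :
    pvGet2 (trimSq x s) i j = pvGet2 x i j := by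
  simp only [pvGet2, List.getD_eq_getElem?_getD, trimSq, List.getElem?_map,
    List.getElem?_take_of_lt hi]
  cases hx : x[i]? with
  | none => simp
  | some r =>
    simp only [Option.map_some, Option.getD_some]
    rw [List.getElem?_take_of_lt hj]

lemma mem_badL (lockT : List (List Int)) (n : Nat) (i j : Nat) :
    ((i, j) ∈ badL lockT n) ↔ i < n ∧ j < n ∧ pvGet2 lockT i j ≠ 1 := by
  simp only [badL, List.mem_flatMap, List.mem_filterMap, List.mem_range]
  constructor
  · rintro ⟨a, ha, b, hb, h⟩
    split at h
    · have h' := Option.some.inj h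
      have ha' : a = i := congrArg Prod.fst h'
      have hb' : b = j := congrArg Prod.snd h'
      subst ha'; subst hb'
      exact ⟨ha, hb, by assumption⟩
    · exact absurd h (by simp)
  · rintro ⟨hi, hj, hv⟩
    exact ⟨i, hi, j, hj, by simp only [pvGet2] at hv; rw [if_pos hv]⟩

lemma minProj_spec (f : Nat × Nat → Nat) (bad : List (Nat × Nat)) (h : bad ≠ []) :
    (∃ p ∈ bad, f p = ((bad.map f).min?).getD 0) ∧
    (∀ p ∈ bad, ((bad.map f).min?).getD 0 ≤ f p) := by
  cases hm : (bad.map f).min? with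
  | none => exact absurd (by simpa using List.min?_eq_none_iff.mp hm) h
  | some a =>
    rcases List.min?_eq_some_iff.mp hm with ⟨hmem, hle⟩
    simp only [Option.getD_some]
    rcases List.mem_map.mp hmem with ⟨p, hp, hfp⟩
    exact ⟨⟨p, hp, hfp⟩, fun q hq => hle _ (List.mem_map_of_mem hq)⟩

lemma maxProj_spec (f : Nat × Nat → Nat) (bad : List (Nat × Nat)) (h : bad ≠ []) :
    (∃ p ∈ bad, f p = ((bad.map f).max?).getD 0) ∧
    (∀ p ∈ bad, f p ≤ ((bad.map f).max?).getD 0) := by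
  cases hm : (bad.map f).max? with
  | none => exact absurd (by simpa using List.max?_eq_none_iff.mp hm) h
  | some a =>
    rcases List.max?_eq_some_iff.mp hm with ⟨hmem, hle⟩
    simp only [Option.getD_some]
    rcases List.mem_map.mp hmem with ⟨p, hp, hfp⟩
    exact ⟨⟨p, hp, hfp⟩, fun q hq => hle _ (List.mem_map_of_mem hq)⟩

-- ---------- rotation equality ----------

lemma rotB_cols (k : List (List Int)) (m i : Nat) (hk : k.length = m) :
    k.reverse.map (fun row => row.getD i 0)
      = (List.range m).map (fun j => (k.getD (m - j - 1) []).getD i 0) := by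
  apply List.ext_getElem (by simp [hk])
  intro j h1 h2
  simp only [List.getElem_map, List.getElem_reverse, List.getElem_range]
  simp only [List.length_map, List.length_reverse, hk] at h1
  rw [List.getD_eq_getElem k [] (by omega)]
  congr 2
  omega

lemma rot_eq_trim (key : List (List Int)) (m : Nat)
    (hhead : (key.headD []).length = m) (hlen : m ≤ key.length)
    (hrows : ∀ r ∈ key.take m, m ≤ r.length) :
    pvRotation key = rotB (trimSq key m) m := by
  rw [pvRotation, rotB]
  simp only [hhead]
  apply List.ext_getElem (by simp)
  intro i h1 h2
  simp only [List.getElem_map, List.getElem_range]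
  rw [rotB_cols (trimSq key m) m i (by simp [trimSq, hlen])]
  apply List.map_congr_left
  intro j hj
  rw [List.mem_range] at hj
  simp only [List.length_map, List.length_range] at h1
  show pvGet2 key (m - j - 1) i = pvGet2 (trimSq key m) (m - j - 1) i
  rw [pvGet2_trimSq key m (m - j - 1) i (by omega) (by omega)]

lemma trimSq_of_Sq (k : List (List Int)) (m : Nat) (h : Sq k m) : trimSq k m = k := by
  rw [trimSq, List.take_of_length_le (le_of_eq h.1)]
  conv_rhs => rw [← List.map_id k]
  apply List.map_congr_left
  intro r hr
  exact List.take_of_length_le (le_of_eq (h.2 r hr))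

lemma headD_len_of_Sq (k : List (List Int)) (m : Nat) (hm : 1 ≤ m) (h : Sq k m) :
    (k.headD []).length = m := by
  cases k with
  | nil =>
    exfalso
    rcases h with ⟨h1, _⟩
    simp at h1
    omega
  | cons r k => exact h.2 r (List.mem_cons_self ..)

lemma Sq_pvRotation (key : List (List Int)) (m : Nat) (hhead : (key.headD []).length = m) :
    Sq (pvRotation key) m := by
  rw [pvRotation]
  simp only [hhead]
  refine ⟨by simp, ?_⟩
  intro r hr
  rcases List.mem_map.mp hr with ⟨i, _, rfl⟩
  simp

lemma rotIter_eq_rotBIter (key : List (List Int)) (m : Nat) (hm : 1 ≤ m)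
    (hhead : (key.headD []).length = m) (hlen : m ≤ key.length)
    (hrows : ∀ r ∈ key.take m, m ≤ r.length) :
    ∀ s : Nat, rotIter key (s + 1) = rotBIter (trimSq key m) m (s + 1)
      ∧ Sq (rotIter key (s + 1)) m := by
  intro s
  induction s with
  | zero =>
    exact ⟨rot_eq_trim key m hhead hlen hrows, Sq_pvRotation key m hhead⟩
  | succ s ih =>
    rcases ih with ⟨heq, hsq⟩
    have hh : ((rotIter key (s + 1)).headD []).length = m := headD_len_of_Sq _ m hm hsq
    constructor
    · show pvRotation (rotIter key (s + 1)) = rotB (rotBIter (trimSq key m) m (s + 1)) m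
      rw [rot_eq_trim (rotIter key (s + 1)) m hh (le_of_eq hsq.1.symm)
          (fun r hr => le_of_eq (hsq.2 r (List.mem_of_mem_take hr)).symm),
        trimSq_of_Sq _ m hsq, heq]
    · exact Sq_pvRotation _ m hh

-- ---------- the main geometric equivalence ----------

lemma existsPlace_iff (lock k : List (List Int)) (n m : Nat) (hm1 : 1 ≤ m) (hmn : m ≤ n)
    (hbad : badL (trimSq lock n) n ≠ []) :
    (∃ dr dc : Int,
        -((n : Nat) : Int) ≤ dr ∧ dr ≤ (n : Int) ∧ -((n : Nat) : Int) ≤ dc ∧ dc ≤ (n : Int) ∧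
        FitsM lock k n m dr dc)
      ↔ ((PySem.List.pyRange ((((((badL (trimSq lock n) n).map Prod.fst).max?).getD 0 : Nat) : Int) - (m : Int) + 1)
            ((((((badL (trimSq lock n) n).map Prod.fst).min?).getD 0 : Nat) : Int) + 1)).any (fun dr =>
          (PySem.List.pyRange ((((((badL (trimSq lock n) n).map Prod.snd).max?).getD 0 : Nat) : Int) - (m : Int) + 1)
            ((((((badL (trimSq lock n) n).map Prod.snd).min?).getD 0 : Nat) : Int) + 1)).any (fun dc =>
            fitsB (trimSq lock n) k n m dr dc))) = true := by
  set lockT := trimSq lock n with hlockT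
  set bad := badL lockT n with hbadL
  set loI := ((bad.map Prod.fst).min?).getD 0 with hloI
  set hiI := ((bad.map Prod.fst).max?).getD 0 with hhiI
  set loJ := ((bad.map Prod.snd).min?).getD 0 with hloJ
  set hiJ := ((bad.map Prod.snd).max?).getD 0 with hhiJ
  have hbridge : ∀ i j : Nat, i < n → j < n → pvGet2 lockT i j = pvGet2 lock i j :=
    fun i j hi hj => pvGet2_trimSq lock n i j hi hj
  rcases minProj_spec Prod.fst bad hbad with ⟨⟨pLoI, hpLoI, hpLoI2⟩, hloI_le⟩
  rcases maxProj_spec Prod.fst bad hbad with ⟨⟨pHiI, hpHiI, hpHiI2⟩, hle_hiI⟩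
  rcases minProj_spec Prod.snd bad hbad with ⟨⟨pLoJ, hpLoJ, hpLoJ2⟩, hloJ_le⟩
  rcases maxProj_spec Prod.snd bad hbad with ⟨⟨pHiJ, hpHiJ, hpHiJ2⟩, hle_hiJ⟩
  have hmemP : ∀ p ∈ bad, p.1 < n ∧ p.2 < n ∧ pvGet2 lockT p.1 p.2 ≠ 1 := by
    rintro ⟨a, b⟩ hp
    exact (mem_badL lockT n a b).mp hp
  constructor
  · rintro ⟨dr, dc, hd1, hd2, hd3, hd4, hfit⟩
    have hcov : ∀ p ∈ bad, dr ≤ (p.1 : Int) ∧ (p.1 : Int) < dr + (m : Int)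
        ∧ dc ≤ (p.2 : Int) ∧ (p.2 : Int) < dc + (m : Int) := by
      rintro ⟨a, b⟩ hp
      rcases hmemP _ hp with ⟨ha, hb, hv⟩
      by_contra hwin
      have hf := hfit a b ha hb
      rw [if_neg hwin, add_zero] at hf
      rw [← hbridge a b ha hb] at hf
      exact hv hf
    rw [List.any_eq_true]
    refine ⟨dr, ?_, ?_⟩
    · rw [PySem.List.mem_pyRange_one]
      rcases hcov _ hpLoI with ⟨hc1, _, _, _⟩
      rcases hcov _ hpHiI with ⟨_, hc2, _, _⟩
      rw [hpLoI2] at hc1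
      rw [hpHiI2] at hc2
      omega
    rw [List.any_eq_true]
    refine ⟨dc, ?_, ?_⟩
    · rw [PySem.List.mem_pyRange_one]
      rcases hcov _ hpLoJ with ⟨_, _, hc1, _⟩
      rcases hcov _ hpHiJ with ⟨_, _, _, hc2⟩
      rw [hpLoJ2] at hc1
      rw [hpHiJ2] at hc2
      omega
    rw [fitsB_iff]
    intro a b ha hb hin
    have hf := hfit (dr + (a : Int)).toNat (dc + (b : Int)).toNat (by omega) (by omega)
    rw [if_pos (by constructor <;> omega)] at hf
    have ea : ((((dr + (a : Int)).toNat : Nat) : Int) - dr).toNat = a := by omega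
    have eb : ((((dc + (b : Int)).toNat : Nat) : Int) - dc).toNat = b := by omega
    rw [ea, eb] at hf
    rw [hbridge _ _ (by omega) (by omega)]
    exact hf
  · intro h
    rw [List.any_eq_true] at h
    rcases h with ⟨dr, hdr, h⟩
    rw [List.any_eq_true] at h
    rcases h with ⟨dc, hdc, h⟩
    rw [PySem.List.mem_pyRange_one] at hdr hdc
    have hloIn : loI < n := by
      rcases hmemP _ hpLoI with ⟨ha, _, _⟩; omega
    have hloJn : loJ < n := by
      rcases hmemP _ hpLoJ with ⟨_, hb, _⟩; omega
    rw [fitsB_iff] at h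
    refine ⟨dr, dc, by omega, by omega, by omega, by omega, ?_⟩
    intro i j hi hj
    by_cases hwin : dr ≤ (i : Int) ∧ (i : Int) < dr + (m : Int) ∧ dc ≤ (j : Int) ∧ (j : Int) < dc + (m : Int)
    · rw [if_pos hwin]
      have hf := h ((i : Int) - dr).toNat ((j : Int) - dc).toNat (by omega) (by omega)
        ⟨by omega, by omega, by omega, by omega⟩
      have ei : (dr + ((((i : Int) - dr).toNat : Nat) : Int)).toNat = i := by omega
      have ej : (dc + ((((j : Int) - dc).toNat : Nat) : Int)).toNat = j := by omega
      rw [ei, ej] at hf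
      rw [← hbridge i j hi hj]
      exact hf
    · rw [if_neg hwin, add_zero, ← hbridge i j hi hj]
      by_contra hv
      have hmem : (i, j) ∈ bad := (mem_badL lockT n i j).mpr ⟨hi, hj, hv⟩
      have hb1 := hloI_le _ hmem
      have hb2 := hle_hiI _ hmem
      have hb3 := hloJ_le _ hmem
      have hb4 := hle_hiJ _ hmem
      simp only at hb1 hb2 hb3 hb4
      exact hwin ⟨by omega, by omega, by omega, by omega⟩

lemma noBad_all_one (lock : List (List Int)) (n : Nat) (h : badL (trimSq lock n) n = []) :
    ∀ i j : Nat, i < n → j < n → pvGet2 lock i j = 1 := by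
  intro i j hi hj
  by_contra hv
  have hmem : (i, j) ∈ badL (trimSq lock n) n :=
    (mem_badL (trimSq lock n) n i j).mpr
      ⟨hi, hj, by rw [pvGet2_trimSq lock n i j hi hj]; exact hv⟩
  rw [h] at hmem
  exact absurd hmem (List.not_mem_nil)

-- ===== VERDICT (by name: the statement is the Claim_ definition above) =====
theorem solution_spec : Claim_equal_solution := by
  intro key lock _ hpre
  unfold Spec_solution
  have hm1 : 1 ≤ (key.headD []).length := hpre.1
  have hmn : (key.headD []).length ≤ (lock.headD []).length := hpre.2.1
  set m := (key.headD []).length with hmdef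
  set n := (lock.headD []).length with hndef
  have hAiff := solution_iff key lock hpre
  have hrotEq := rotIter_eq_rotBIter key m hm1 rfl hpre.2.2.1 hpre.2.2.2.1
  have hBshow : solution_alt key lock =
      (if (badL (trimSq lock n) n).isEmpty then true
       else loopRotsB (trimSq lock n) (trimSq key m) n m
          ((((badL (trimSq lock n) n).map Prod.fst).min?).getD 0)
          ((((badL (trimSq lock n) n).map Prod.fst).max?).getD 0)
          ((((badL (trimSq lock n) n).map Prod.snd).min?).getD 0)
          ((((badL (trimSq lock n) n).map Prod.snd).max?).getD 0) 4) := rfl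
  by_cases hempty : (badL (trimSq lock n) n).isEmpty
  · rw [hBshow, if_pos hempty]
    have hall := noBad_all_one lock n (List.isEmpty_iff.mp hempty)
    rw [hAiff.mpr ?_]
    refine ⟨0, by omega, -(n : Int), -(n : Int), by omega, by omega, by omega, by omega, ?_⟩
    intro i j hi hj
    rw [if_neg (by omega), add_zero]
    exact hall i j hi hj
  · have hbadne : badL (trimSq lock n) n ≠ [] := fun hc => hempty (by rw [hc]; rfl)
    rw [hBshow, if_neg hempty]
    have hloop := loopRotsB_iff (trimSq lock n) n m
      ((((badL (trimSq lock n) n).map Prod.fst).min?).getD 0)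
      ((((badL (trimSq lock n) n).map Prod.fst).max?).getD 0)
      ((((badL (trimSq lock n) n).map Prod.snd).min?).getD 0)
      ((((badL (trimSq lock n) n).map Prod.snd).max?).getD 0) 4 (trimSq key m)
    have hBiff := fun (s : Nat) => existsPlace_iff lock (rotIter key (s + 1)) n m hm1 hmn hbadne
    cases hA : solution key lock with
    | true =>
      rcases hAiff.mp hA with ⟨s, hs, hplace⟩
      have hany := (hBiff s).mp hplace
      rw [(hrotEq s).1] at hany
      exact (hloop.mpr ⟨s, hs, hany⟩).symm
    | false =>
      by_contra hB
      have hBtrue : loopRotsB (trimSq lock n) (trimSq key m) n m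
          ((((badL (trimSq lock n) n).map Prod.fst).min?).getD 0)
          ((((badL (trimSq lock n) n).map Prod.fst).max?).getD 0)
          ((((badL (trimSq lock n) n).map Prod.snd).min?).getD 0)
          ((((badL (trimSq lock n) n).map Prod.snd).max?).getD 0) 4 = true := by
        cases hx : loopRotsB (trimSq lock n) (trimSq key m) n m
            ((((badL (trimSq lock n) n).map Prod.fst).min?).getD 0)
            ((((badL (trimSq lock n) n).map Prod.fst).max?).getD 0)
            ((((badL (trimSq lock n) n).map Prod.snd).min?).getD 0)
            ((((badL (trimSq lock n) n).map Prod.snd).max?).getD 0) 4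
        · exact absurd hx.symm hB
        · rfl
      rcases hloop.mp hBtrue with ⟨s, hs, hany⟩
      rw [← (hrotEq s).1] at hany
      have := hAiff.mpr ⟨s, hs, (hBiff s).mpr hany⟩
      rw [hA] at this
      exact Bool.noConfusion this
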